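-- pv_equiv track=rewrite | github.com/ariramirez91/SampleFastApiApp | utils/utils.py | fibonnacci
-- ===== SOURCE A (Python) =====
-- def fibonnacci(givenNumber):
--     number1 = 1
--     number2 = 1
--     nextFibo = number1 + number2
--     while nextFibo <= givenNumber:
--         number1 = number2
--         number2 = nextFibo
--         nextFibo = number1 + number2
--
--     return nextFibo
-- ===== SOURCE B (Python) =====
-- def fibonnacci(givenNumber):
--     def fib_pair(k):
--         # (F(k), F(k+1)) with F(0)=0, F(1)=1, by fast doubling
--         if k == 0:
--             return (0, 1)
--         a, b = fib_pair(k >> 1)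
--         c = a * (2 * b - a)
--         d = a * a + b * b
--         if k & 1:
--             return (d, c + d)
--         return (c, d)
--
--     # exponential search over the Fibonacci index, then binary search for the
--     # least index m >= 3 with F(m) > givenNumber
--     k = 3
--     while fib_pair(k)[0] <= givenNumber:
--         k *= 2
--     lo, hi = (3, 3) if k == 3 else (k // 2, k)
--     while lo < hi:
--         mid = (lo + hi) // 2
--         if fib_pair(mid)[0] > givenNumber:
--             hi = mid
--         else:
--             lo = mid + 1
--     return fib_pair(lo)[0]
-- ===== Notes on version B (the rewrite author's own statement) =====
-- stated objective: alternative
-- what changed: Replaces the linear iteration of the Fibonacci recurrence by fast-doubling computation of Fibonacci numbers combined with exponential-then-binary search over the index for the least Fibonacci number exceeding givenNumber.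
import Mathlib
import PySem

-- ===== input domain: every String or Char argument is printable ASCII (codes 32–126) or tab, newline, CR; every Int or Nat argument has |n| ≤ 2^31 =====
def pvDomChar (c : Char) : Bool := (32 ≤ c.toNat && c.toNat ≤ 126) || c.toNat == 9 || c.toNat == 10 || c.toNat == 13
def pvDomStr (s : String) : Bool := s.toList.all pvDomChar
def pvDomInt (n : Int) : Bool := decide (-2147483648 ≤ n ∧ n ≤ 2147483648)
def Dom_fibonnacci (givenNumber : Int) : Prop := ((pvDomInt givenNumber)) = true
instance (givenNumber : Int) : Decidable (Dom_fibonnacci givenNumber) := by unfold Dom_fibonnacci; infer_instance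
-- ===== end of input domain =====

-- B replaces A's linear iteration of the Fibonacci recurrence by a different algorithm:
-- fast-doubling computation of F(k) plus exponential-then-binary search over the index
-- for the least m ≥ 3 with F(m) > givenNumber; same return value everywhere.

-- ===== PORT A =====
-- A's while loop over state (number1, number2, nextFibo); the proof argument only
-- carries the invariant (1 ≤ number2 ∧ 1 ≤ nextFibo) needed for termination.
def fibonnacciLoop (givenNumber _number1 number2 nextFibo : Int)
    (h : 1 ≤ number2 ∧ 1 ≤ nextFibo) : Int :=
  if nextFibo ≤ givenNumber then
    -- number1 = number2; number2 = nextFibo; nextFibo = number1 + number2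
    fibonnacciLoop givenNumber number2 nextFibo (number2 + nextFibo) ⟨h.2, by omega⟩
  else
    nextFibo
termination_by (givenNumber - nextFibo + 1).toNat
decreasing_by omega

def fibonnacci (givenNumber : Int) : Int :=
  -- number1 = 1; number2 = 1; nextFibo = number1 + number2
  fibonnacciLoop givenNumber 1 1 (1 + 1) ⟨by norm_num, by norm_num⟩

-- ===== PORT B =====
-- fib_pair(k) = (F(k), F(k+1)) by fast doubling; k is always ≥ 0 here, so Nat, and the
-- values are the (nonnegative) Fibonacci numbers, kept as Nat: `2 * b - a` is exact here
-- because a = F(m) ≤ 2 * F(m+1) = 2 * b (proved in fibPair_eq below).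
def fibPair : Nat → Nat × Nat
  | 0 => (0, 1)
  | (k + 1) =>
    let p := fibPair ((k + 1) / 2)
    let a := p.1
    let b := p.2
    let c := a * (2 * b - a)
    let d := a * a + b * b
    if (k + 1) % 2 = 1 then (d, c + d) else (c, d)
decreasing_by omega

-- `while fib_pair(k)[0] <= givenNumber: k *= 2`, with a fuel counter as a pure totality
-- guard (the lemmas below prove the loop always exits via its own condition within
-- `givenNumber.toNat + 5` iterations, so the fuel branch never produces the result)
def expSearch (givenNumber : Int) (fuel k : Nat) : Nat :=
  match fuel with
  | 0 => k
  | fuel + 1 =>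
    if ((fibPair k).1 : Int) ≤ givenNumber then expSearch givenNumber fuel (k * 2) else k

-- `while lo < hi: …` binary search, again with a fuel counter as a pure totality guard
-- (hi - lo shrinks every iteration, so fuel = hi is always enough; proved below)
def bSearch (givenNumber : Int) (fuel lo hi : Nat) : Nat :=
  match fuel with
  | 0 => lo
  | fuel + 1 =>
    if lo < hi then
      let mid := (lo + hi) / 2
      if givenNumber < ((fibPair mid).1 : Int) then bSearch givenNumber fuel lo mid
      else bSearch givenNumber fuel (mid + 1) hi
    else lo

def fibonnacci_alt (givenNumber : Int) : Int :=
  let k := expSearch givenNumber (givenNumber.toNat + 5) 3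
  let p := if k = 3 then (3, 3) else (k / 2, k)
  ((fibPair (bSearch givenNumber p.2 p.1 p.2)).1 : Int)

-- ===== PRECONDITION & SPEC =====
def Spec_fibonnacci (givenNumber : Int) (out : Int) : Prop := out = fibonnacci_alt givenNumber
instance (givenNumber : Int) (out : Int) : Decidable (Spec_fibonnacci givenNumber out) := by unfold Spec_fibonnacci; infer_instance

-- ===== CLAIM (what is proved, stated in full; the proofs are below) =====
def Claim_equal_fibonnacci : Prop := ∀ (givenNumber : Int), Dom_fibonnacci givenNumber → Spec_fibonnacci givenNumber (fibonnacci givenNumber)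

-- ===== LEMMAS AND PROOFS =====

-- correctness of fast doubling
lemma fibPair_eq (k : Nat) : fibPair k = (Nat.fib k, Nat.fib (k + 1)) := by
  induction k using Nat.strong_induction_on with
  | _ k ih =>
    match k with
    | 0 => simp [fibPair]
    | (j + 1) =>
      rw [fibPair]
      rw [ih ((j + 1) / 2) (by omega)]
      set m := (j + 1) / 2 with hm
      rcases Nat.even_or_odd (j + 1) with ⟨t, ht⟩ | ⟨t, ht⟩
      · have h2 : j + 1 = 2 * m := by omega
        rw [if_neg (by omega : ¬ (j + 1) % 2 = 1)]
        simp only [Prod.mk.injEq]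
        constructor
        · rw [h2, Nat.fib_two_mul]
        · rw [show j + 1 + 1 = 2 * m + 1 by omega, Nat.fib_two_mul_add_one,
            Nat.pow_two, Nat.pow_two]
          omega
      · have h2 : j + 1 = 2 * m + 1 := by omega
        rw [if_pos (by omega : (j + 1) % 2 = 1)]
        simp only [Prod.mk.injEq]
        constructor
        · rw [h2, Nat.fib_two_mul_add_one, Nat.pow_two, Nat.pow_two]
          omega
        · rw [show j + 1 + 1 = 2 * m + 2 by omega,
            (Nat.fib_add_two : Nat.fib (2 * m + 2) = _), Nat.fib_two_mul,
            Nat.fib_two_mul_add_one, Nat.pow_two, Nat.pow_two]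
          omega

-- The common characterisation: m is "the answer index" for g.
def AnsIdx (g : Int) (m : Nat) : Prop :=
  3 ≤ m ∧ g < (Nat.fib m : Int) ∧ (m = 3 ∨ (Nat.fib (m - 1) : Int) ≤ g)

-- the answer index is unique (fib is strictly increasing from index 2 on)
lemma ansIdx_unique {g : Int} {m m' : Nat} (h : AnsIdx g m) (h' : AnsIdx g m') : m = m' := by
  obtain ⟨h3, hg, hp⟩ := h
  obtain ⟨h3', hg', hp'⟩ := h'
  by_contra hne
  rcases Nat.lt_or_ge m m' with hlt | hge
  · have hm' : (Nat.fib (m' - 1) : Int) ≤ g := by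
      rcases hp' with rfl | h; · omega
      · exact h
    have : Nat.fib m ≤ Nat.fib (m' - 1) := Nat.fib_mono (by omega)
    have : (Nat.fib m : Int) ≤ (Nat.fib (m' - 1) : Int) := by exact_mod_cast this
    omega
  · have hlt : m' < m := by omega
    have hm : (Nat.fib (m - 1) : Int) ≤ g := by
      rcases hp with rfl | h; · omega
      · exact h
    have : Nat.fib m' ≤ Nat.fib (m - 1) := Nat.fib_mono (by omega)
    have : (Nat.fib m' : Int) ≤ (Nat.fib (m - 1) : Int) := by exact_mod_cast this
    omega

-- A's loop, run from Fibonacci state (F k, F (k+1), F (k+2)), returns F m for the answer index m.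
lemma loopA_ans (g n1 n2 nf : Int) (h : 1 ≤ n2 ∧ 1 ≤ nf) :
    ∀ k : Nat, 1 ≤ k → n2 = (Nat.fib (k + 1) : Int) → nf = (Nat.fib (k + 2) : Int) →
      (k = 1 ∨ (Nat.fib (k + 1) : Int) ≤ g) →
      ∃ m, AnsIdx g m ∧ fibonnacciLoop g n1 n2 nf h = (Nat.fib m : Int) := by
  fun_induction fibonnacciLoop g n1 n2 nf h with
  | case1 n1 n2 nf h hle ih =>
    intro k hk h2 h3 hprev
    refine ih (k + 1) (by omega) h3 ?_ (by right; rw [← h3]; exact hle)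
    have hf : Nat.fib (k + 1 + 2) = Nat.fib (k + 1) + Nat.fib (k + 2) := by
      rw [show k + 1 + 2 = (k + 1) + 2 from rfl, Nat.fib_add_two]
    rw [h2, h3, hf]; push_cast; ring
  | case2 n1 n2 nf h hgt =>
    intro k hk h2 h3 hprev
    refine ⟨k + 2, ⟨by omega, by rw [← h3]; omega, ?_⟩, h3⟩
    rcases hprev with rfl | hle
    · left; rfl
    · right; simpa using hle

-- the exponential search exits through its own condition (never through the fuel) and
-- returns K with F(K) > g, keeping the invariant K = 3 ∨ (6 ≤ K ∧ F(K/2) ≤ g)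
lemma expSearch_ans (g : Int) :
    ∀ fuel k : Nat, 3 ≤ k → (k = 3 ∨ (6 ≤ k ∧ (Nat.fib (k / 2) : Int) ≤ g)) →
      g.toNat + 5 ≤ fuel + k →
      let K := expSearch g fuel k
      3 ≤ K ∧ g < (Nat.fib K : Int) ∧ (K = 3 ∨ (6 ≤ K ∧ (Nat.fib (K / 2) : Int) ≤ g)) := by
  intro fuel
  induction fuel with
  | zero =>
    intro k hk hinv hfuel
    show (3 ≤ k ∧ g < (Nat.fib k : Int) ∧ _)
    refine ⟨hk, ?_, hinv⟩
    have h5 : 5 ≤ k := by omega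
    have h1 : (k : Int) ≤ (Nat.fib k : Int) := by exact_mod_cast Nat.le_fib_self h5
    omega
  | succ fuel ih =>
    intro k hk hinv hfuel
    show (3 ≤ expSearch g (fuel + 1) k ∧ _)
    rw [expSearch]
    by_cases hle : ((fibPair k).1 : Int) ≤ g
    · rw [if_pos hle]
      refine ih (k * 2) (by omega) ?_ (by omega)
      right
      refine ⟨by omega, ?_⟩
      rw [show k * 2 / 2 = k by omega]
      simpa [fibPair_eq] using hle
    · rw [if_neg hle]
      refine ⟨hk, ?_, hinv⟩
      rw [fibPair_eq] at hle
      simp only at hle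
      omega
  -- the binary search exits with lo = hi (never through the fuel, since the interval
-- shrinks every iteration) and narrows [lo, hi] to the answer index
lemma bSearch_ans (g : Int) :
    ∀ fuel lo hi : Nat, 3 ≤ lo → lo ≤ hi → hi ≤ fuel + lo →
      g < (Nat.fib hi : Int) → (lo = 3 ∨ (Nat.fib (lo - 1) : Int) ≤ g) →
      AnsIdx g (bSearch g fuel lo hi) := by
  intro fuel
  induction fuel with
  | zero =>
    intro lo hi h3 hle hfuel hhi hlo
    have heq : lo = hi := by omega
    exact ⟨h3, by rw [show bSearch g 0 lo hi = lo from rfl, heq]; exact hhi, hlo⟩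
  | succ fuel ih =>
    intro lo hi h3 hle hfuel hhi hlo
    rw [bSearch]
    by_cases hlt : lo < hi
    · rw [if_pos hlt]
      by_cases hgt : g < ((fibPair ((lo + hi) / 2)).1 : Int)
      · rw [if_pos hgt]
        refine ih lo ((lo + hi) / 2) h3 (by omega) (by omega) ?_ hlo
        simpa [fibPair_eq] using hgt
      · rw [if_neg hgt]
        refine ih ((lo + hi) / 2 + 1) hi (by omega) (by omega) (by omega) hhi ?_
        right
        have : ¬ g < (Nat.fib ((lo + hi) / 2) : Int) := by simpa [fibPair_eq] using hgt
        simpa using by omega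
    · rw [if_neg hlt]
      have heq : lo = hi := by omega
      exact ⟨h3, by rw [heq]; exact hhi, hlo⟩

-- B returns F m for the answer index m
lemma alt_ans (g : Int) : ∃ m, AnsIdx g m ∧ fibonnacci_alt g = (Nat.fib m : Int) := by
  unfold fibonnacci_alt
  have hK := expSearch_ans g (g.toNat + 5) 3 (by norm_num) (Or.inl rfl) (by omega)
  set K := expSearch g (g.toNat + 5) 3 with hKdef
  obtain ⟨hK3, hKg, hKinv⟩ := hK
  by_cases h3 : K = 3
  · refine ⟨bSearch g 3 3 3, ?_, ?_⟩
    · exact bSearch_ans g 3 3 3 (by norm_num) (by norm_num) (by norm_num)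
        (by rw [← h3]; exact hKg) (Or.inl rfl)
    · simp [h3, fibPair_eq]
  · rcases hKinv with h | ⟨h6, hhalf⟩
    · exact absurd h h3
    refine ⟨bSearch g K (K / 2) K, ?_, ?_⟩
    · refine bSearch_ans g K (K / 2) K (by omega) (by omega) (by omega) hKg ?_
      right
      calc (Nat.fib (K / 2 - 1) : Int) ≤ (Nat.fib (K / 2) : Int) := by
            exact_mod_cast Nat.fib_mono (by omega)
        _ ≤ g := hhalf
    · simp [if_neg h3, fibPair_eq]

-- ===== VERDICT (by name: the statement is the Claim_ definition above) =====
theorem fibonnacci_spec : Claim_equal_fibonnacci := by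
  intro g _
  unfold Spec_fibonnacci
  obtain ⟨mA, hA, hAval⟩ :=
    loopA_ans g 1 1 (1 + 1) ⟨by norm_num, by norm_num⟩ 1 le_rfl (by norm_num) (by norm_num)
      (Or.inl rfl)
  obtain ⟨mB, hB, hBval⟩ := alt_ans g
  unfold fibonnacci
  rw [hAval, hBval, ansIdx_unique hA hB]
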